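-- pv_equiv track=rewrite | github.com/maciejsobieniak/code-kata | codesignal/1/solution.py | repeat_char_jump
-- ===== SOURCE A (Python) =====
-- def repeat_char_jump(inputString, k):
--     result = ''
--     n = 0
--     i = 0
--     length = len(inputString)
--     while n < length:
--         if n == 0:
--             result += inputString[n]
--         else:
--             i = (i + k) % length
--             result += inputString[i]
--         n += 1
--     return result
-- ===== SOURCE B (Python) =====
-- def _gcd(a, b):
--     while b:
--         a, b = b, a % b
--     return a
--
--
-- def repeat_char_jump(inputString, k):
--     length = len(inputString)
--     if length == 0:
--         return ''
--     g = _gcd(length, k % length)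
--     period = length // g
--     cycle = ''.join(inputString[(j * k) % length] for j in range(period))
--     return cycle * g
-- ===== Notes on version B (the rewrite author's own statement) =====
-- stated objective: faster
-- what changed: Replaces A's accumulator loop (running index i += k mod length, an n==0 special case, and repeated string +=) by a period/gcd decomposition: B computes g = gcd(length, k % length) with a Euclid loop, builds the single cycle of length//g characters the jump traverses, and tiles it g times by string repetition.
import Mathlib
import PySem

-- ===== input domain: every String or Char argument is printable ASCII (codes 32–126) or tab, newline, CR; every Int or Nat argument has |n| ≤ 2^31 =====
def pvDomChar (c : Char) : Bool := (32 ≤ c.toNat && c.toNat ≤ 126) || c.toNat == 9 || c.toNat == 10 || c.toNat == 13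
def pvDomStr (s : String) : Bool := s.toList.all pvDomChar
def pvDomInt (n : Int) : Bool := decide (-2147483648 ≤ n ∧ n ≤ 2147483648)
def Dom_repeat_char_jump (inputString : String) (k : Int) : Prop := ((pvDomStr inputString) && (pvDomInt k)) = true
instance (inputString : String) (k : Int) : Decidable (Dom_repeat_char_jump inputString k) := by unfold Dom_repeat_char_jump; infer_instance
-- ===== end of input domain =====

-- B replaces A's accumulator loop (quadratic repeated string +=) by a period/gcd decomposition:
-- one cycle of length len/gcd(len, k % len) is built and tiled gcd times by string repetition; a timing run measured B faster.


-- ===== PORT A =====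
-- while n < length: if n == 0 take inputString[n]; else i = (i + k) % length, take inputString[i]
def repeat_char_jump (inputString : String) (k : Int) : String :=
  let cs := inputString.toList
  let length : Int := cs.length
  let st := (PySem.List.pyRange 0 length 1).foldl
    (fun (st : List Char × Int) n =>
      if n == 0 then
        (st.1 ++ [PySem.List.pyGetD cs n ' '], st.2)
      else
        let i := PySem.Int.mod (st.2 + k) length
        (st.1 ++ [PySem.List.pyGetD cs i ' '], i))
    ([], 0)
  String.mk st.1

-- ===== PORT B =====
-- helper _gcd: while b: a, b = b, a % b; return a
def pyEuclid (a b : Int) : Int :=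
  if h : b = 0 then a else pyEuclid b (PySem.Int.mod a b)
termination_by b.natAbs
decreasing_by
  rcases lt_or_gt_of_ne h with hneg | hpos
  · have h1 := PySem.Int.mod_neg_bounds a hneg
    omega
  · have h1 := PySem.Int.mod_nonneg a hpos
    have h2 := PySem.Int.mod_lt a hpos
    omega

-- length == 0 → ''; g = _gcd(length, k % length); period = length // g;
-- cycle = ''.join(s[(j*k) % length] for j in range(period)); return cycle * g
def repeat_char_jump_alt (inputString : String) (k : Int) : String :=
  let cs := inputString.toList
  let length : Int := cs.length
  if length = 0 then "" else
  let g := pyEuclid length (PySem.Int.mod k length)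
  let period := PySem.Int.floordiv length g
  let cycle := (PySem.List.pyRange 0 period 1).map
    (fun j => PySem.List.pyGetD cs (PySem.Int.mod (j * k) length) ' ')
  String.mk (List.flatten (List.replicate g.toNat cycle))

-- ===== PRECONDITION & SPEC =====
def Spec_repeat_char_jump (inputString : String) (k : Int) (out : String) : Prop := out = repeat_char_jump_alt inputString k
instance (inputString : String) (k : Int) (out : String) : Decidable (Spec_repeat_char_jump inputString k out) := by unfold Spec_repeat_char_jump; infer_instance

-- ===== CLAIM (what is proved, stated in full; the proofs are below) =====
def Claim_equal_repeat_char_jump : Prop := ∀ (inputString : String) (k : Int), Dom_repeat_char_jump inputString k → Spec_repeat_char_jump inputString k (repeat_char_jump inputString k)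

-- ===== LEMMAS AND PROOFS =====

-- A's loop state after j steps: the emitted characters are the first j characters of
-- map (fun n => cs[(n*k) % L]) and the accumulator i equals ((j-1)*k) % L (0 while j ≤ 1).
theorem repeat_char_jump_loop_inv (cs : List Char) (k : Int) (hcs : cs ≠ []) :
    ∀ (j : Nat), j ≤ cs.length →
      ((List.range j).map (fun n : Nat => (n : Int))).foldl
        (fun (st : List Char × Int) n =>
          if n == 0 then
            (st.1 ++ [PySem.List.pyGetD cs n ' '], st.2)
          else
            (st.1 ++ [PySem.List.pyGetD cs (PySem.Int.mod (st.2 + k) (cs.length : Int)) ' '],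
             PySem.Int.mod (st.2 + k) (cs.length : Int)))
        ([], 0)
      = ((List.range j).map
           (fun n : Nat => PySem.List.pyGetD cs (PySem.Int.mod ((n : Int) * k) (cs.length : Int)) ' '),
         if j = 0 then 0 else PySem.Int.mod (((j : Int) - 1) * k) (cs.length : Int)) := by
  intro j hj
  have hLpos : (0 : Int) < (cs.length : Int) := by
    have : 0 < cs.length := List.length_pos_iff.mpr hcs
    exact_mod_cast this
  induction j with
  | zero => simp
  | succ j ih =>
    have hj' : j ≤ cs.length := Nat.le_of_succ_le hj
    rw [List.range_succ, List.map_append, List.foldl_append, ih hj']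
    by_cases hj0 : j = 0
    · subst hj0
      simp [PySem.Int.mod_eq_emod_of_pos hLpos]
    · have hb : ¬ ((((j : Nat) : Int)) == 0) = true := by simp [hj0]
      simp only [List.map_cons, List.map_nil, List.foldl_cons, List.foldl_nil, if_neg hb,
        if_neg hj0, Nat.succ_ne_zero, if_false]
      have hmod : PySem.Int.mod (PySem.Int.mod (((j : Int) - 1) * k) (cs.length : Int) + k) (cs.length : Int)
          = PySem.Int.mod ((j : Int) * k) (cs.length : Int) := by
        rw [PySem.Int.mod_eq_emod_of_pos hLpos, PySem.Int.mod_eq_emod_of_pos hLpos,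
            PySem.Int.mod_eq_emod_of_pos hLpos, Int.emod_add_emod]
        ring_nf
      rw [hmod]
      simp only [Prod.mk.injEq]
      constructor
      · simp
      · congr 1
        push_cast
        ring

-- pyEuclid computes Int.gcd on nonnegative arguments
theorem pyEuclid_eq_gcd_aux : ∀ (N : Nat) (a b : Int), b.natAbs ≤ N → 0 ≤ a → 0 ≤ b →
    pyEuclid a b = (Int.gcd a b : Int) := by
  intro N
  induction N with
  | zero =>
    intro a b hle ha _
    have hb0 : b = 0 := by omega
    subst hb0
    rw [pyEuclid, dif_pos rfl, Int.gcd_zero_right, Int.natAbs_of_nonneg ha]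
  | succ N ih =>
    intro a b hle ha hb
    by_cases hb0 : b = 0
    · subst hb0
      rw [pyEuclid, dif_pos rfl, Int.gcd_zero_right, Int.natAbs_of_nonneg ha]
    · have hbpos : 0 < b := lt_of_le_of_ne hb (Ne.symm hb0)
      rw [pyEuclid, dif_neg hb0, PySem.Int.mod_eq_emod_of_pos hbpos]
      have hm1 := Int.emod_nonneg a hb0
      have hm2 := Int.emod_lt_of_pos a hbpos
      rw [ih b (a % b) (by omega) hb hm1, Int.gcd_comm, Int.gcd_emod]

theorem pyEuclid_eq_gcd (a b : Int) (ha : 0 ≤ a) (hb : 0 ≤ b) :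
    pyEuclid a b = (Int.gcd a b : Int) :=
  pyEuclid_eq_gcd_aux b.natAbs a b le_rfl ha hb

-- tiling lemma: a map over range (g*p) of a p-periodic function is g copies of one period
theorem map_range_periodic {α : Type} (f : Nat → α) (p g : Nat)
    (hf : ∀ n, f (n + p) = f n) :
    (List.range (g * p)).map f = (List.replicate g ((List.range p).map f)).flatten := by
  induction g with
  | zero => simp
  | succ g ih =>
    have hshift : ∀ n m : Nat, f (n + m * p) = f n := by
      intro n m
      induction m with
      | zero => simp
      | succ m ihm => rw [Nat.succ_mul, ← Nat.add_assoc, hf, ihm]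
    rw [Nat.succ_mul, List.range_add, List.map_append, ih, List.replicate_succ',
      List.flatten_append]
    congr 1
    simp only [List.flatten_cons, List.flatten_nil, List.append_nil, List.map_map]
    refine List.map_congr_left ?_
    intro n _
    simpa [Nat.add_comm] using hshift n g

-- ===== VERDICT (by name: the statement is the Claim_ definition above) =====
theorem repeat_char_jump_spec : Claim_equal_repeat_char_jump := by
  intro inputString k _
  unfold Spec_repeat_char_jump repeat_char_jump repeat_char_jump_alt
  rcases eq_or_ne inputString.toList [] with hnil | hne
  · simp [hnil, PySem.List.pyRange]
    rfl
  · set cs := inputString.toList with hcs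
    have hLnat : 0 < cs.length := List.length_pos_iff.mpr hne
    have hLpos : (0 : Int) < (cs.length : Int) := by exact_mod_cast hLnat
    have hL0 : ((cs.length : Int) = 0) = False := by simp; omega
    simp only [hL0, if_false]
    -- rewrite A's side via the loop invariant
    rw [PySem.List.pyRange_zero_nat,
        repeat_char_jump_loop_inv cs k hne cs.length le_rfl]
    dsimp only
    -- identify g with the gcd
    have hmodk : PySem.Int.mod k (cs.length : Int) = k % (cs.length : Int) :=
      PySem.Int.mod_eq_emod_of_pos hLpos
    have hg : pyEuclid (cs.length : Int) (PySem.Int.mod k (cs.length : Int))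
        = (Int.gcd (cs.length : Int) k : Int) := by
      rw [hmodk, pyEuclid_eq_gcd _ _ (le_of_lt hLpos) (Int.emod_nonneg k (by omega)),
          Int.gcd_comm, Int.gcd_emod, Int.gcd_comm]
    set G : Nat := Int.gcd (cs.length : Int) k with hGdef
    have hGpos : 0 < G := by
      rw [hGdef]
      exact Int.gcd_pos_of_ne_zero_left k (by omega)
    have hGdvdL : G ∣ cs.length := by
      have := Int.gcd_dvd_left (cs.length : Int) k
      exact_mod_cast Int.ofNat_dvd.mp (by exact_mod_cast this)
    set p : Nat := cs.length / G with hpdef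
    have hpG : p * G = cs.length := Nat.div_mul_cancel hGdvdL
    -- the port's period is (p : Int)
    have hper : PySem.Int.floordiv (cs.length : Int) ((Int.gcd (cs.length : Int) k : Nat) : Int)
        = ((p : Nat) : Int) := by
      rw [hpdef, ← hGdef]
      exact_mod_cast PySem.Int.floordiv_natCast cs.length G
    rw [hg, hper, PySem.List.pyRange_zero_nat, List.map_map, Int.toNat_natCast]
    -- periodicity of the per-position character
    have hdvd : ((cs.length : Int)) ∣ ((p : Int) * k) := by
      obtain ⟨m, hm⟩ := Int.gcd_dvd_right (cs.length : Int) k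
      refine ⟨m, ?_⟩
      rw [hm, ← mul_assoc, ← hGdef]
      norm_cast
      rw [hpG]
    have hperiodic : ∀ n : Nat,
        (fun n : Nat => PySem.List.pyGetD cs (PySem.Int.mod ((n : Int) * k) (cs.length : Int)) ' ') (n + p)
        = (fun n : Nat => PySem.List.pyGetD cs (PySem.Int.mod ((n : Int) * k) (cs.length : Int)) ' ') n := by
      intro n
      simp only []
      congr 1
      obtain ⟨m, hm⟩ := hdvd
      rw [PySem.Int.mod_eq_emod_of_pos hLpos, PySem.Int.mod_eq_emod_of_pos hLpos]
      have : ((n + p : Nat) : Int) * k = (n : Int) * k + (cs.length : Int) * m := by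
        push_cast
        rw [add_mul, hm]
      rw [this, Int.add_mul_emod_self_left]
    have := map_range_periodic
      (fun n : Nat => PySem.List.pyGetD cs (PySem.Int.mod ((n : Int) * k) (cs.length : Int)) ' ')
      p G hperiodic
    rw [Nat.mul_comm, hpG] at this
    rw [this]
    rfl
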